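-- pv_equiv track=rewrite | github.com/uja-works/MENACE | menace_labels_latex.py | all_symmetries
-- ===== SOURCE A (Python) =====
-- from typing import List, Set, Dict, Tuple
--
-- def all_symmetries(board: List[str]) -> List[List[str]]:
--     """Generate all 8 symmetries (rotations and reflections) of a 3x3 board."""
--     def rotate(b):
--         return [b[6], b[3], b[0],
--                 b[7], b[4], b[1],
--                 b[8], b[5], b[2]]
--     def reflect(b):
--         return [b[2], b[1], b[0],
--                 b[5], b[4], b[3],
--                 b[8], b[7], b[6]]
--     boards = []
--     b = board[:]
--     for _ in range(4):
--         boards.append(b)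
--         boards.append(reflect(b))
--         b = rotate(b)
--     # unique
--     uniq = []
--     seen = set()
--     for bb in boards:
--         s = ''.join(bb)
--         if s not in seen:
--             seen.add(s)
--             uniq.append(bb)
--     return uniq
-- ===== SOURCE B (Python) =====
-- def all_symmetries(board):
--     """Generate all 8 symmetries (rotations and reflections) of a 3x3 board.
--
--     Each symmetry is computed directly per cell from closed-form coordinate
--     maps (no iterated rotation): symmetry s = (mirror m, quarter-turns q),
--     emitted in the order identity, mirror, rot, mirror*rot, ... ; duplicates
--     are removed with an insertion-ordered dict keyed by the joined board.
--     """
--     def src(q, r, c):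
--         # source cell of (r, c) under q clockwise quarter-turns
--         if q == 0:
--             return r, c
--         if q == 1:
--             return 2 - c, r
--         if q == 2:
--             return 2 - r, 2 - c
--         return c, 2 - r
--     uniq = {}
--     for s in range(8):
--         q, m = divmod(s, 2)
--         if s == 0:
--             bb = board[:]
--         else:
--             bb = []
--             for i in range(9):
--                 r, c = divmod(i, 3)
--                 if m == 1:
--                     c = 2 - c
--                 rr, cc = src(q, r, c)
--                 bb.append(board[3 * rr + cc])
--         uniq.setdefault(''.join(bb), bb)
--     return list(uniq.values())
-- ===== Notes on version B (the rewrite author's own statement) =====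
-- stated objective: alternative
-- what changed: Instead of iterating rotate/reflect board transformations, B computes each of the 8 symmetries cell-by-cell from closed-form coordinate maps (mirror bit, quarter-turn count) and deduplicates with an insertion-ordered dict keyed by the joined board instead of a list plus seen-set.
-- outside the precondition, e.g. on all_symmetries(['X', 'O']): A raises IndexError, B raises IndexError
import Mathlib
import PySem

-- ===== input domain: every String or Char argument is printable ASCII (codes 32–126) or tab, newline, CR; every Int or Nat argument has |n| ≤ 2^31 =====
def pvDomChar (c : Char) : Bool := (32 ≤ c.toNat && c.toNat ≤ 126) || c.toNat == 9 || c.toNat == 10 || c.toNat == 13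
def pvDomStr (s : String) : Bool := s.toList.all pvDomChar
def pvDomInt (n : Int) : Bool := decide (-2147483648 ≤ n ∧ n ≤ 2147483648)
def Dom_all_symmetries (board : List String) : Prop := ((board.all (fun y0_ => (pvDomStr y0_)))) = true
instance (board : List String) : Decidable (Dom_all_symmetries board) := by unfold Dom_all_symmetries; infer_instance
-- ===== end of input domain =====

-- B computes each of the 8 symmetries cell-by-cell from closed-form coordinate maps
-- (mirror bit + quarter-turn count) instead of iterating rotate/reflect, and dedups
-- with an insertion-ordered dict; objective: alternative decomposition, not faster.


-- ===== PORT A =====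
-- b[i] with 0 ≤ i < 9 is total under Pre_ (length ≥ 9); pyGetD is exact there.
def pvRotate (b : List String) : List String :=
  [PySem.List.pyGetD b 6 "", PySem.List.pyGetD b 3 "", PySem.List.pyGetD b 0 "",
   PySem.List.pyGetD b 7 "", PySem.List.pyGetD b 4 "", PySem.List.pyGetD b 1 "",
   PySem.List.pyGetD b 8 "", PySem.List.pyGetD b 5 "", PySem.List.pyGetD b 2 ""]

def pvReflect (b : List String) : List String :=
  [PySem.List.pyGetD b 2 "", PySem.List.pyGetD b 1 "", PySem.List.pyGetD b 0 "",
   PySem.List.pyGetD b 5 "", PySem.List.pyGetD b 4 "", PySem.List.pyGetD b 3 "",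
   PySem.List.pyGetD b 8 "", PySem.List.pyGetD b 7 "", PySem.List.pyGetD b 6 ""]

def all_symmetries (board : List String) : List (List String) :=
  -- for _ in range(4): boards.append(b); boards.append(reflect(b)); b = rotate(b)
  let st := (List.range 4).foldl
    (fun (st : List (List String) × List String) _ =>
      (st.1 ++ [st.2, pvReflect st.2], pvRotate st.2))
    ([], board)
  -- unique: keep first occurrence of each joined string (list + seen set)
  (st.1.foldl
    (fun (acc : List (List String) × PySem.Set String) bb =>
      let s := PySem.Str.join "" bb
      if PySem.Set.contains acc.2 s then acc
      else (acc.1 ++ [bb], PySem.Set.add acc.2 s))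
    ([], PySem.Set.empty)).1

-- ===== PORT B =====
-- source cell of (r, c) under q clockwise quarter-turns
def pvSrc (q r c : Nat) : Nat × Nat :=
  if q = 0 then (r, c)
  else if q = 1 then (2 - c, r)
  else if q = 2 then (2 - r, 2 - c)
  else (c, 2 - r)

def all_symmetries_alt (board : List String) : List (List String) :=
  -- for s in range(8): build symmetry s cell by cell; uniq.setdefault(join, bb)
  ((List.range 8).foldl
    (fun (uniq : PySem.Dict String (List String)) s =>
      let q := s / 2
      let m := s % 2
      let bb : List String :=
        if s = 0 then board
        else (List.range 9).map (fun i =>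
          let r := i / 3
          let c := i % 3
          let c := if m = 1 then 2 - c else c
          let rc := pvSrc q r c
          PySem.List.pyGetD board ((3 * rc.1 + rc.2 : Nat) : Int) "")
      uniq.setdefault (PySem.Str.join "" bb) bb)
    PySem.Dict.empty).values

-- ===== PRECONDITION & SPEC =====
-- Pre_ excludes boards with fewer than 9 cells, on which A (and B) raise IndexError.
def Pre_all_symmetries (board : List String) : Prop := 9 ≤ board.length
instance (board : List String) : Decidable (Pre_all_symmetries board) := by
  unfold Pre_all_symmetries; infer_instance

def pvWitness_all_symmetries : List String :=
  ["X", "O", " ", " ", "X", "O", "O", " ", "X"]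

def Spec_all_symmetries (board : List String) (out : List (List String)) : Prop := out = all_symmetries_alt board
instance (board : List String) (out : List (List String)) : Decidable (Spec_all_symmetries board out) := by unfold Spec_all_symmetries; infer_instance

-- ===== CLAIM (what is proved, stated in full; the proofs are below) =====
def Claim_equal_all_symmetries : Prop := ∀ (board : List String), Dom_all_symmetries board → Pre_all_symmetries board → Spec_all_symmetries board (all_symmetries board)

-- ===== LEMMAS AND PROOFS =====

-- dedup by (list, seen-set) equals dedup by insertion-ordered dict, from matching states
theorem pv_dedup_set_eq_dict (l : List (List String))
    (acc : List (List String) × PySem.Set String) (d : PySem.Dict String (List String))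
    (hv : acc.1 = d.values) (hk : acc.2 = d.keys) :
    (l.foldl
      (fun (acc : List (List String) × PySem.Set String) bb =>
        let s := PySem.Str.join "" bb
        if PySem.Set.contains acc.2 s then acc
        else (acc.1 ++ [bb], PySem.Set.add acc.2 s)) acc).1
    = (l.foldl
      (fun (uniq : PySem.Dict String (List String)) bb =>
        uniq.setdefault (PySem.Str.join "" bb) bb) d).values := by
  induction l generalizing acc d with
  | nil => simpa using hv
  | cons bb t ih =>
    simp only [List.foldl_cons]
    by_cases hc : d.contains (PySem.Str.join "" bb) = true
    · have hcs : PySem.Set.contains acc.2 (PySem.Str.join "" bb) = true := by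
        rw [hk]
        simpa [PySem.Dict.contains_iff_mem_keys] using hc
      rw [PySem.Dict.setdefault_of_contains _ _ hc]
      simp only [hcs, if_true]
      exact ih acc d hv hk
    · have hcb : d.contains (PySem.Str.join "" bb) = false := by
        simpa using hc
      have hcs : PySem.Set.contains acc.2 (PySem.Str.join "" bb) = false := by
        rw [hk]
        simp only [PySem.Set.contains_eq_listContains]
        simpa [List.contains_iff_mem, PySem.Dict.contains_iff_mem_keys] using hc
      rw [PySem.Dict.setdefault_of_not_contains _ _ hcb]
      simp only [hcs, Bool.false_eq_true, if_false]
      apply ih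
      · rw [hv]
        simp [PySem.Dict.values, PySem.Dict.items_insert_of_not_contains _ _ hcb]
      · rw [hk]
        have hmem : PySem.Str.join "" bb ∉ d.keys := by
          simpa [PySem.Dict.contains_iff_mem_keys] using hc
        rw [PySem.Set.add_of_not_mem hmem]
        simp [PySem.Dict.keys, PySem.Dict.items_insert_of_not_contains _ _ hcb]

-- candidate list of B's generation, as one named term (proof-only helper)
def pvCand (x0 x1 x2 x3 x4 x5 x6 x7 x8 : String) (rest : List String) : List (List String) :=
  (List.range 8).map (fun s =>
    let q := s / 2
    let m := s % 2
    if s = 0 then x0 :: x1 :: x2 :: x3 :: x4 :: x5 :: x6 :: x7 :: x8 :: rest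
    else (List.range 9).map (fun i =>
      let r := i / 3
      let c := i % 3
      let c := if m = 1 then 2 - c else c
      let rc := pvSrc q r c
      PySem.List.pyGetD (x0 :: x1 :: x2 :: x3 :: x4 :: x5 :: x6 :: x7 :: x8 :: rest)
        ((3 * rc.1 + rc.2 : Nat) : Int) ""))

-- ===== VERDICT (by name: the statement is the Claim_ definition above) =====
set_option maxHeartbeats 2000000 in
theorem all_symmetries_spec : Claim_equal_all_symmetries := by
  intro board _ hpre
  unfold Spec_all_symmetries
  match board, hpre with
  | x0 :: x1 :: x2 :: x3 :: x4 :: x5 :: x6 :: x7 :: x8 :: rest, _ =>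
    have h1 : all_symmetries (x0 :: x1 :: x2 :: x3 :: x4 :: x5 :: x6 :: x7 :: x8 :: rest)
        = ((pvCand x0 x1 x2 x3 x4 x5 x6 x7 x8 rest).foldl
            (fun (acc : List (List String) × PySem.Set String) bb =>
              let s := PySem.Str.join "" bb
              if PySem.Set.contains acc.2 s then acc
              else (acc.1 ++ [bb], PySem.Set.add acc.2 s))
            ([], PySem.Set.empty)).1 := rfl
    have h2 : all_symmetries_alt (x0 :: x1 :: x2 :: x3 :: x4 :: x5 :: x6 :: x7 :: x8 :: rest)
        = ((pvCand x0 x1 x2 x3 x4 x5 x6 x7 x8 rest).foldl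
            (fun (uniq : PySem.Dict String (List String)) bb =>
              uniq.setdefault (PySem.Str.join "" bb) bb)
            PySem.Dict.empty).values := rfl
    rw [h1, h2]
    exact pv_dedup_set_eq_dict _ ([], PySem.Set.empty) PySem.Dict.empty rfl rfl
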